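-- pv_equiv track=rewrite | github.com/ebaadazam/Recursion-in-Python | Recursion.py | first_upper
-- ===== SOURCE A (Python) =====
-- def first_upper(str, i):
--     l = len(str)
--     if i >= l:
--         return -1
--     if str[i].isupper():
--         return i
--     if i < l:
--         return first_upper(str, i+1)
-- ===== SOURCE B (Python) =====
-- def first_upper(str, i):
--     l = len(str)
--     for idx in range(i, l):
--         if str[idx].isupper():
--             return idx
--     return -1
-- ===== Notes on version B (the rewrite author's own statement) =====
-- stated objective: simpler
-- what changed: Replaces the self-recursive scan with a single iterative for-loop over range(i, len(str)) with early return, eliminating the recursion (and its depth limit) while preserving the exact index sequence, including negative-index wraparound.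
import Mathlib
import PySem

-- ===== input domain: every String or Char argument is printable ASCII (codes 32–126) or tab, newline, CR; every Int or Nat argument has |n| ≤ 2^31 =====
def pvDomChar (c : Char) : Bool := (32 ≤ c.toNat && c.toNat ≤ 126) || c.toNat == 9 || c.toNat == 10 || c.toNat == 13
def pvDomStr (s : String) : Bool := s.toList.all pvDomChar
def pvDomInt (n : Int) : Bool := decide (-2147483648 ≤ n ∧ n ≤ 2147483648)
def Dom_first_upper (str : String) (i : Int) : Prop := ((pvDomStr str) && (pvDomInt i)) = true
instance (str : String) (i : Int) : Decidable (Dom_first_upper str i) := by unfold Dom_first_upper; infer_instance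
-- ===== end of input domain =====

-- B replaces A's self-recursion by a single iterative scan over range(i, len(str)) with early
-- return (simpler, constant stack); return values agree everywhere A does not raise.

-- ===== PORT A =====
-- literal port of the recursion; str[i] with possibly negative i is PySem.Str.pyGet?
def first_upper (str : String) (i : Int) : Int :=
  if _h : i ≥ (PySem.Str.len str) then -1
  else
    match PySem.Str.pyGet? str i with
    | none => -1  -- Python raises IndexError here (i < -len); excluded by Pre_
    | some c =>
      if PySem.Chars.isupper c then i
      else if i < (PySem.Str.len str) then first_upper str (i+1)
      else -1  -- unreachable (Python would fall off returning None)
termination_by ((PySem.Str.len str) - i).toNat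
decreasing_by
  simp only [PySem.Str.len_eq] at *
  omega

-- ===== PORT B =====
-- for idx in range(i, l): early return on isupper → List.find? over pyRange
def first_upper_alt (str : String) (i : Int) : Int :=
  match (PySem.List.pyRange i (PySem.Str.len str) 1).find?
      (fun idx => PySem.Chars.isupper ((PySem.Str.pyGet? str idx).getD ' ')) with
  | some idx => idx
  | none => -1

-- ===== PRECONDITION & SPEC =====
-- Pre_ excludes exactly the inputs where str[i] raises IndexError in both programs: i < -len(str).
def Pre_first_upper (str : String) (i : Int) : Prop := -(str.toList.length : Int) ≤ i
instance (str : String) (i : Int) : Decidable (Pre_first_upper str i) := by unfold Pre_first_upper; infer_instance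
def pvWitness_first_upper : String × Int := ("abC", 0)
def Spec_first_upper (str : String) (i : Int) (out : Int) : Prop := out = first_upper_alt str i
instance (str : String) (i : Int) (out : Int) : Decidable (Spec_first_upper str i out) := by unfold Spec_first_upper; infer_instance

-- ===== CLAIM (what is proved, stated in full; the proofs are below) =====
def Claim_equal_first_upper : Prop := ∀ (str : String) (i : Int), Dom_first_upper str i → Pre_first_upper str i → Spec_first_upper str i (first_upper str i)

-- ===== LEMMAS AND PROOFS =====

-- B's recursion shape: find? over a cons'd range
lemma alt_step (str : String) (i : Int) (hlt : i < (PySem.Str.len str)) :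
    first_upper_alt str i =
      if PySem.Chars.isupper ((PySem.Str.pyGet? str i).getD ' ') then i
      else first_upper_alt str (i+1) := by
  unfold first_upper_alt
  rw [PySem.List.pyRange_one_cons hlt]
  simp only [List.find?_cons]
  split_ifs with h <;>
    simp only [PySem.Str.pyGet?_eq, PySem.Chars.pyGet?_eq_listPyGet?] at h <;> simp [h]

lemma alt_nil (str : String) (i : Int) (hge : (PySem.Str.len str) ≤ i) :
    first_upper_alt str i = -1 := by
  unfold first_upper_alt
  rw [PySem.List.pyRange_one_eq_nil hge]
  simp

lemma key (str : String) : ∀ (n : Nat) (i : Int), -(str.toList.length : Int) ≤ i →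
    ((PySem.Str.len str) - i).toNat = n → first_upper str i = first_upper_alt str i := by
  intro n
  induction n with
  | zero =>
    intro i _ hn
    have hge : (PySem.Str.len str) ≤ i := by
      simp only [PySem.Str.len_eq] at hn ⊢; omega
    rw [alt_nil str i hge]
    unfold first_upper
    rw [dif_pos hge]
  | succ m ih =>
    intro i hpre hn
    have hlt : i < (PySem.Str.len str) := by
      simp only [PySem.Str.len_eq] at hn ⊢; omega
    have hin : ¬ (PySem.Str.pyGet? str i = none) := by
      simp only [PySem.Str.pyGet?_eq, PySem.Chars.pyGet?_eq_listPyGet?,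
        PySem.List.pyGet?_eq_none_iff, PySem.Raise.InRange]
      simp only [PySem.Str.len_eq] at hlt
      omega
    obtain ⟨c, hc⟩ := Option.ne_none_iff_exists'.mp hin
    rw [alt_step str i hlt, hc]
    unfold first_upper
    rw [dif_neg (by omega)]
    rw [hc]
    simp only [Option.getD_some]
    split_ifs with hu
    · rfl
    · exact ih (i+1) (by omega) (by simp only [PySem.Str.len_eq] at hn ⊢; omega)

-- ===== VERDICT (by name: the statement is the Claim_ definition above) =====
theorem first_upper_spec : Claim_equal_first_upper := by
  intro str i _ hpre
  unfold Spec_first_upper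
  exact key str ((PySem.Str.len str) - i).toNat i hpre rfl
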